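-- pv_equiv track=rewrite | github.com/beejh02/Self-Study | 알고리즘/프로그래머스/pg_lv2_더맵게.py | solution
-- ===== SOURCE A (Python) =====
-- import heapq
--
-- def solution(scoville, K):
--
--     cnt = 0
--     heapq.heapify(scoville)
--
--
--     while(scoville[0] < K):
--         try:
--             n1 = heapq.heappop(scoville)
--             n2 = heapq.heappop(scoville)*2
--
--             heapq.heappush(scoville, n1+n2)
--             cnt += 1
--         except:
--             return -1
--
--     return cnt
-- ===== SOURCE B (Python) =====
-- def solution(scoville, K):
--     # Two-queue merge: sort once, then keep newly mixed values in a FIFO list.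
--     # Each new value a + 2*b (a,b the two current minima) is >= the previous
--     # still-unconsumed mixed value, so `made` stays sorted and the global
--     # minimum is always one of the two queue fronts: O(1) per mix, no heap.
--     base = sorted(scoville)
--     made = []
--     i = j = 0
--     cnt = 0
--     while True:
--         if j == len(made) or (i < len(base) and base[i] <= made[j]):
--             lo = base[i]          # IndexError here only when scoville is empty
--         else:
--             lo = made[j]
--         if lo >= K:
--             return cnt
--         if (len(base) - i) + (len(made) - j) < 2:
--             return -1
--         if j == len(made) or (i < len(base) and base[i] <= made[j]):
--             i += 1
--         else:
--             j += 1
--         if j == len(made) or (i < len(base) and base[i] <= made[j]):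
--             second = base[i]
--             i += 1
--         else:
--             second = made[j]
--             j += 1
--         made.append(lo + 2 * second)
--         cnt += 1
-- ===== Notes on version B (the rewrite author's own statement) =====
-- stated objective: faster
-- what changed: Replaces A's binary heap (heapify + log-n heappop/heappush per mix) by a two-queue merge: sort the input once, keep the newly mixed values in a plain FIFO list (they are produced in nondecreasing order, so it stays sorted), and take each minimum in O(1) from one of the two queue fronts; return value only, A heapifies its argument in place while B leaves it unmutated.
import Mathlib
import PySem

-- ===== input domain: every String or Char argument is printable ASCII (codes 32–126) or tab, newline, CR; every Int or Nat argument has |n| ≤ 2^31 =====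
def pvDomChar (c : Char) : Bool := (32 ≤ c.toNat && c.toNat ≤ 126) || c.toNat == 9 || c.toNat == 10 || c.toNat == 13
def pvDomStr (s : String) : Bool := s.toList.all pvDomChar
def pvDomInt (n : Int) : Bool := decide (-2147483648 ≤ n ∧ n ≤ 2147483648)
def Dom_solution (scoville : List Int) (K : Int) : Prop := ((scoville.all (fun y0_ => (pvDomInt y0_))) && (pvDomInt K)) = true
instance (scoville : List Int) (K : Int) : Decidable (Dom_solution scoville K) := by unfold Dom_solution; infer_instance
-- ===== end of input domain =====

-- B replaces A's binary heap by a two-queue merge: sort once, then keep the newly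
-- mixed values in a FIFO list (they come out in nondecreasing order), so the global
-- minimum is always one of the two queue fronts.  Equivalence is about the RETURN
-- value only — A heapifies its argument in place, B does not mutate it.

-- ===== PORT A =====
-- A's heapq library calls are ported by their stdlib semantics on the list's
-- contents: heapify reorders in place (contents unchanged), heappop removes and
-- returns the smallest element, heappush adds one.  heap[0] is the minimum.
-- The `none` branch of `h.min?` is Python's IndexError on an empty heap:
-- unreachable inside the loop (the size shrinks by exactly 1 per iteration and
-- the -1 branch fires at size 1), reachable only for scoville = [], which
-- Pre_solution excludes; the port returns the dummy 0 there.
def solutionLoopA (K : Int) (cnt : Int) (h : List Int) : Int :=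
  match hm : h.min? with
  | none => 0                                    -- IndexError in Python (empty heap)
  | some n1 =>
    if n1 < K then
      match hm2 : (h.erase n1).min? with
      | none => -1                               -- `except: return -1` (second heappop failed)
      | some m =>
        solutionLoopA K (cnt + 1) (((h.erase n1).erase m) ++ [n1 + m * 2])
    else cnt
termination_by h.length
decreasing_by
  have h1 : n1 ∈ h := (List.min?_eq_some_iff.mp hm).1
  have h2 : m ∈ h.erase n1 := (List.min?_eq_some_iff.mp hm2).1
  have e1 := List.length_erase_of_mem h1
  have e2 := List.length_erase_of_mem h2
  have hp : 1 ≤ h.length := List.length_pos_iff.mpr (List.ne_nil_of_mem h1)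
  have hp2 : 1 ≤ (h.erase n1).length := List.length_pos_iff.mpr (List.ne_nil_of_mem h2)
  simp [e1, e2] at *
  omega

def solution (scoville : List Int) (K : Int) : Int :=
  solutionLoopA K 0 scoville

-- ===== PORT B =====
-- the `while True` loop of Source B over the fixed sorted list `base` and the growing
-- FIFO `made`, with the two cursors i (into base) and j (into made).  The cursors
-- are nonnegative counters, so plain Nat indexing is exact; `base[i]?` at the peek
-- is Python's base[i] (none = IndexError, reachable only for scoville = [], which
-- Pre_solution excludes: dummy 0 there).  The guarded `getD` reads are the
-- in-range accesses base[i]/made[j] of Source B (i < len(base) is checked in the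
-- condition itself; j < len(made) whenever j ≠ len(made), since j only ever
-- advances past appended elements).  Source B's two sequential pop-ifs become the
-- four nested branches, each ending in the tail call with the updated cursors
-- and `made + [lo + 2*second]`.
def solutionLoopB (base : List Int) (K : Int) (i j : Nat) (made : List Int) (cnt : Int) : Int :=
  match (if j = made.length ∨ (i < base.length ∧ base.getD i 0 ≤ made.getD j 0)
         then base[i]? else made[j]?) with
  | none => 0                                    -- IndexError in Python (empty input)
  | some lo =>
    if K ≤ lo then cnt                           -- `if lo >= K: return cnt`
    else if ((base.length : Int) - i) + ((made.length : Int) - j) < 2 then -1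
    else
      if j = made.length ∨ (i < base.length ∧ base.getD i 0 ≤ made.getD j 0) then
        -- first pop from base (i += 1), then the second pop:
        if j = made.length ∨ (i + 1 < base.length ∧ base.getD (i + 1) 0 ≤ made.getD j 0) then
          solutionLoopB base K (i + 2) j (made ++ [lo + 2 * base.getD (i + 1) 0]) (cnt + 1)
        else
          solutionLoopB base K (i + 1) (j + 1) (made ++ [lo + 2 * made.getD j 0]) (cnt + 1)
      else
        -- first pop from made (j += 1), then the second pop:
        if j + 1 = made.length ∨ (i < base.length ∧ base.getD i 0 ≤ made.getD (j + 1) 0) then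
          solutionLoopB base K (i + 1) (j + 1) (made ++ [lo + 2 * base.getD i 0]) (cnt + 1)
        else
          solutionLoopB base K i (j + 2) (made ++ [lo + 2 * made.getD (j + 1) 0]) (cnt + 1)
termination_by base.length + made.length - (i + j)
decreasing_by
  all_goals simp only [List.length_append, List.length_cons, List.length_nil]
  all_goals omega

def solution_alt (scoville : List Int) (K : Int) : Int :=
  solutionLoopB (PySem.List.sorted scoville (fun x => x) false) K 0 0 [] 0

-- ===== PRECONDITION & SPEC =====
-- Pre_ excludes exactly the empty list, on which A (and B) raise IndexError.
def Pre_solution (scoville : List Int) (K : Int) : Prop := scoville ≠ []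
instance (scoville : List Int) (K : Int) : Decidable (Pre_solution scoville K) := by
  unfold Pre_solution; infer_instance
def pvWitness_solution : List Int × Int := ([1, 2, 3, 9, 10, 12], 7)

def Spec_solution (scoville : List Int) (K : Int) (out : Int) : Prop := out = solution_alt scoville K
instance (scoville : List Int) (K : Int) (out : Int) : Decidable (Spec_solution scoville K out) := by unfold Spec_solution; infer_instance

-- ===== CLAIM (what is proved, stated in full; the proofs are below) =====
def Claim_equal_solution : Prop := ∀ (scoville : List Int) (K : Int), Dom_solution scoville K → Pre_solution scoville K → Spec_solution scoville K (solution scoville K)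

-- ===== LEMMAS AND PROOFS =====

-- unfolding equations for A's loop (its matches are dependent)
theorem loopA_stop (K cnt : Int) (h : List Int) (n1 : Int) (hm : h.min? = some n1)
    (hK : ¬ n1 < K) : solutionLoopA K cnt h = cnt := by
  rw [solutionLoopA.eq_def]
  split
  · next heq => rw [hm] at heq; cases heq
  · next n1' heq =>
    rw [hm] at heq; injection heq with hx; subst hx
    simp [hK]

theorem loopA_fail (K cnt : Int) (h : List Int) (n1 : Int) (hm : h.min? = some n1)
    (hK : n1 < K) (hm2 : (h.erase n1).min? = none) : solutionLoopA K cnt h = -1 := by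
  rw [solutionLoopA.eq_def]
  split
  · next heq => rw [hm] at heq; cases heq
  · next n1' heq =>
    rw [hm] at heq; injection heq with hx; subst hx
    rw [if_pos hK]
    split
    · rfl
    · next m heq2 => rw [hm2] at heq2; cases heq2

theorem loopA_step (K cnt : Int) (h : List Int) (n1 m : Int) (hm : h.min? = some n1)
    (hK : n1 < K) (hm2 : (h.erase n1).min? = some m) :
    solutionLoopA K cnt h = solutionLoopA K (cnt + 1) (((h.erase n1).erase m) ++ [n1 + m * 2]) := by
  rw [solutionLoopA.eq_def]
  split
  · next heq => rw [hm] at heq; cases heq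
  · next n1' heq =>
    rw [hm] at heq; injection heq with hx; subst hx
    rw [if_pos hK]
    split
    · next heq2 => rw [hm2] at heq2; cases heq2
    · next m' heq2 => rw [hm2] at heq2; injection heq2 with hx2; subst hx2; rfl

-- the minimum of any permutation of a two-part split whose member x bounds both parts
theorem min?_split (h bsL msL : List Int) (x : Int) (hperm : h.Perm (bsL ++ msL))
    (hx : x ∈ bsL ++ msL) (hb : ∀ y ∈ bsL, x ≤ y) (hm : ∀ y ∈ msL, x ≤ y) :
    h.min? = some x := by
  rw [List.min?_eq_some_iff]
  refine ⟨hperm.mem_iff.mpr hx, ?_⟩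
  intro b hbm
  rcases List.mem_append.mp (hperm.mem_iff.mp hbm) with h1 | h1
  · exact hb b h1
  · exact hm b h1

theorem erase_perm_middle (h l1 l2 : List Int) (a : Int) (hp : h.Perm (l1 ++ a :: l2)) :
    (h.erase a).Perm (l1 ++ l2) := by
  have hmid : (l1 ++ a :: l2).Perm (a :: (l1 ++ l2)) := List.perm_middle
  have hp2 : h.Perm (a :: (l1 ++ l2)) := hp.trans hmid
  have := hp2.erase a
  simpa [List.erase_cons_head] using this

theorem sorted_all_le_getLast (l : List Int) (hs : l.Pairwise (· ≤ ·)) (L : Int)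
    (hL : l.getLast? = some L) : ∀ y ∈ l, y ≤ L := by
  have hne : l ≠ [] := by intro e; rw [e] at hL; cases hL
  have hdec : l.dropLast ++ [l.getLast hne] = l := List.dropLast_concat_getLast hne
  have hLv : l.getLast hne = L := by
    have := List.getLast?_eq_some_getLast hne
    rw [this] at hL; injection hL
  intro y hy
  rw [← hdec] at hs hy
  rcases List.mem_append.mp hy with h1 | h1
  · have := (List.pairwise_append.mp hs).2.2 y h1 (l.getLast hne) (by simp)
    omega
  · simp at h1; omega

theorem pairwise_concat_of_le (l : List Int) (v : Int) (hs : l.Pairwise (· ≤ ·))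
    (hv : ∀ y ∈ l, y ≤ v) : (l ++ [v]).Pairwise (· ≤ ·) := by
  rw [List.pairwise_append]
  exact ⟨hs, List.pairwise_singleton _ _, by intro a ha b hb; simp at hb; subst hb; exact hv a ha⟩

theorem mem_dropLast_of_append (l1 l2 : List Int) (h2 : l2 ≠ []) (y : Int) (hy : y ∈ l1) :
    y ∈ (l1 ++ l2).dropLast := by
  rw [List.dropLast_append_of_ne_nil h2]
  exact List.mem_append.mpr (Or.inl hy)

-- bridges between the cursor view (getD / getElem?) and the suffix view (drop)
theorem drop_cons_getElem? (l : List Int) (n : Nat) (x : Int) (xs : List Int)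
    (hd : l.drop n = x :: xs) : l[n]? = some x := by
  have h0 : (l.drop n).head? = l[n]? := List.head?_drop
  rw [hd] at h0; exact h0.symm

theorem drop_cons_getD (l : List Int) (n : Nat) (x : Int) (xs : List Int)
    (hd : l.drop n = x :: xs) : l.getD n 0 = x := by
  rw [List.getD_eq_getElem?_getD, drop_cons_getElem? l n x xs hd]; rfl

theorem drop_cons_lt (l : List Int) (n : Nat) (x : Int) (xs : List Int)
    (hd : l.drop n = x :: xs) : n < l.length := by
  by_contra hc
  rw [List.drop_eq_nil_iff.mpr (by omega)] at hd; cases hd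

theorem drop_cons_succ (l : List Int) (n : Nat) (x : Int) (xs : List Int)
    (hd : l.drop n = x :: xs) : l.drop (n + 1) = xs := by
  have h1 : (l.drop n).drop 1 = l.drop (n + 1) := List.drop_drop
  rw [hd] at h1
  simpa using h1.symm

theorem drop_append_one (made : List Int) (v : Int) (j : Nat) (hj : j ≤ made.length) :
    (made ++ [v]).drop j = made.drop j ++ [v] := List.drop_append_of_le_length hj

-- THE MAIN INVARIANT: A's heap loop agrees with B's two-queue loop whenever A's heap
-- is a permutation of base[i:] ++ made[j:], both halves are sorted, and the back L of
-- the made-queue satisfies L ≤ 3f for some lower bound f of everything else (the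
-- second minimum of the previous mix: it forces the next appended value a + 2b with
-- a, b ≥ f to land at or above L, so `made` stays sorted).
theorem loop_agree (N : Nat) : ∀ (base made : List Int) (i j : Nat) (h : List Int) (K cnt : Int),
    i ≤ base.length → j ≤ made.length →
    base.length + made.length - (i + j) = N →
    (base.drop i).Pairwise (· ≤ ·) →
    (made.drop j).Pairwise (· ≤ ·) →
    h.Perm (base.drop i ++ made.drop j) →
    (made.drop j ≠ [] → ∃ f, (∀ x ∈ base.drop i, f ≤ x) ∧
        (∀ y ∈ (made.drop j).dropLast, f ≤ y) ∧
        (∀ L, (made.drop j).getLast? = some L → L ≤ 3 * f)) →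
    base.drop i ++ made.drop j ≠ [] →
    solutionLoopA K cnt h = solutionLoopB base K i j made cnt := by
  induction N using Nat.strong_induction_on with
  | _ N ih =>
  intro base made i j h K cnt hi hj hN hsb hsm hperm hinv hne
  have hmsnil : j = made.length ↔ made.drop j = [] := by
    rw [List.drop_eq_nil_iff]; omega
  have hlenbs : (base.drop i).length = base.length - i := List.length_drop
  have hlenms : (made.drop j).length = made.length - j := List.length_drop
  rw [solutionLoopB.eq_def]
  by_cases hC : j = made.length ∨ (i < base.length ∧ base.getD i 0 ≤ made.getD j 0)
  · -- ===== peek takes base[i] =====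
    have hbsne : base.drop i ≠ [] := by
      rcases hC with hC1 | hC2
      · rw [hmsnil.mp hC1] at hne; simpa using hne
      · intro e; have := List.drop_eq_nil_iff.mp e; omega
    obtain ⟨b0, bs1, hbs⟩ := List.exists_cons_of_ne_nil hbsne
    have hib : base[i]? = some b0 := drop_cons_getElem? base i b0 bs1 hbs
    have higetD : base.getD i 0 = b0 := drop_cons_getD base i b0 bs1 hbs
    have hsb1 : bs1.Pairwise (· ≤ ·) := by
      rw [hbs] at hsb; exact (List.pairwise_cons.mp hsb).2
    have hb0bs : ∀ y ∈ base.drop i, b0 ≤ y := by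
      intro y hy; rw [hbs] at hy
      rcases List.mem_cons.mp hy with rfl | hy'
      · exact le_refl _
      · exact (List.pairwise_cons.mp (hbs ▸ hsb)).1 y hy'
    have hb0ms : ∀ y ∈ made.drop j, b0 ≤ y := by
      rcases hC with hC1 | hC2
      · rw [hmsnil.mp hC1]; intro y hy; cases hy
      · intro y hy
        have hmsne : made.drop j ≠ [] := List.ne_nil_of_mem hy
        obtain ⟨m0, ms1, hms⟩ := List.exists_cons_of_ne_nil hmsne
        have hm0 : made.getD j 0 = m0 := drop_cons_getD made j m0 ms1 hms
        rw [higetD, hm0] at hC2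
        rw [hms] at hy
        rcases List.mem_cons.mp hy with rfl | hy'
        · exact hC2.2
        · exact le_trans hC2.2 ((List.pairwise_cons.mp (hms ▸ hsm)).1 y hy')
    have hmin : h.min? = some b0 :=
      min?_split h (base.drop i) (made.drop j) b0 hperm
        (List.mem_append.mpr (Or.inl (by rw [hbs]; exact List.mem_cons_self))) hb0bs hb0ms
    rw [if_pos hC, hib]
    simp only []
    by_cases hK : K ≤ b0
    · rw [if_pos hK]
      exact loopA_stop K cnt h b0 hmin (by omega)
    · rw [if_neg hK]
      have hKlt : b0 < K := by omega
      by_cases hrem : ((base.length : Int) - i) + ((made.length : Int) - j) < 2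
      · rw [if_pos hrem]
        have h1 : (base.drop i).length + (made.drop j).length ≤ 1 := by
          rw [hlenbs, hlenms]; omega
        rw [hbs] at h1; simp only [List.length_cons] at h1
        have hb1 : bs1 = [] := List.length_eq_zero_iff.mp (by omega)
        have hm1 : made.drop j = [] := List.length_eq_zero_iff.mp (by omega)
        have hh : h = [b0] := by
          apply List.Perm.eq_singleton
          rw [hbs, hb1, hm1] at hperm; simpa using hperm
        refine loopA_fail K cnt h b0 hmin hKlt ?_
        rw [hh, List.erase_cons_head]; rfl
      · rw [if_neg hrem]
        have hrem2 : 2 ≤ (base.drop i).length + (made.drop j).length := by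
          rw [hlenbs, hlenms]; omega
        have hilt : i < base.length := drop_cons_lt base i b0 bs1 hbs
        have hdrop1 : base.drop (i + 1) = bs1 := drop_cons_succ base i b0 bs1 hbs
        have hera : (h.erase b0).Perm (bs1 ++ made.drop j) := by
          refine erase_perm_middle h [] (bs1 ++ made.drop j) b0 ?_
          rw [hbs] at hperm; simpa using hperm
        rw [if_pos hC]
        by_cases hC2 : j = made.length ∨ (i + 1 < base.length ∧ base.getD (i + 1) 0 ≤ made.getD j 0)
        · -- ===== second pop also from base =====
          have hbs1ne : bs1 ≠ [] := by
            rcases hC2 with hC1 | hC2'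
            · have hmnil : made.drop j = [] := hmsnil.mp hC1
              rw [hbs, hmnil] at hrem2
              simp only [List.length_cons, List.length_nil] at hrem2
              intro e; rw [e] at hrem2; simp at hrem2
            · intro e
              have : base.drop (i+1) = [] := by rw [hdrop1, e]
              have := List.drop_eq_nil_iff.mp this; omega
          obtain ⟨b1, bs2, hbs1⟩ := List.exists_cons_of_ne_nil hbs1ne
          have hbs1' : base.drop (i + 1) = b1 :: bs2 := by rw [hdrop1, hbs1]
          have hgetD1 : base.getD (i + 1) 0 = b1 := drop_cons_getD base (i+1) b1 bs2 hbs1'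
          have hi1lt : i + 1 < base.length := drop_cons_lt base (i+1) b1 bs2 hbs1'
          have hdrop2 : base.drop (i + 2) = bs2 := by
            have := drop_cons_succ base (i+1) b1 bs2 hbs1'
            simpa [Nat.add_assoc] using this
          have hb1bs2 : ∀ y ∈ bs2, b1 ≤ y := by
            intro y hy
            exact (List.pairwise_cons.mp (hbs1 ▸ hsb1)).1 y hy
          have hb1ms : ∀ y ∈ made.drop j, b1 ≤ y := by
            rcases hC2 with hC1 | hC2'
            · rw [hmsnil.mp hC1]; intro y hy; cases hy
            · intro y hy
              have hmsne : made.drop j ≠ [] := List.ne_nil_of_mem hy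
              obtain ⟨m0, ms1, hms⟩ := List.exists_cons_of_ne_nil hmsne
              have hm0 : made.getD j 0 = m0 := drop_cons_getD made j m0 ms1 hms
              rw [hgetD1, hm0] at hC2'
              rw [hms] at hy
              rcases List.mem_cons.mp hy with rfl | hy'
              · exact hC2'.2
              · exact le_trans hC2'.2 ((List.pairwise_cons.mp (hms ▸ hsm)).1 y hy')
          have hmin2 : (h.erase b0).min? = some b1 := by
            refine min?_split _ (b1 :: bs2) (made.drop j) b1 (by rw [← hbs1]; exact hera)
              (by simp) ?_ hb1ms
            intro y hy
            rcases List.mem_cons.mp hy with rfl | hy'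
            · exact le_refl _
            · exact hb1bs2 y hy'
          rw [if_pos hC2, hgetD1]
          rw [loopA_step K cnt h b0 b1 hmin hKlt hmin2,
              show b0 + b1 * 2 = b0 + 2 * b1 from by ring]
          have hb0b1 : b0 ≤ b1 := hb0bs b1 (by rw [hbs, hbs1]; simp)
          have happ : (made ++ [b0 + 2 * b1]).drop j = made.drop j ++ [b0 + 2 * b1] :=
            drop_append_one made _ j hj
          have hmsle : ∀ y ∈ made.drop j, y ≤ b0 + 2 * b1 := by
            intro y hy
            have hmsne : made.drop j ≠ [] := List.ne_nil_of_mem hy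
            obtain ⟨f, hf1, hf2, hf3⟩ := hinv hmsne
            obtain ⟨L, hL⟩ := Option.isSome_iff_exists.mp (List.getLast?_isSome.mpr hmsne)
            have hyL := sorted_all_le_getLast (made.drop j) hsm L hL y hy
            have hfb0 : f ≤ b0 := hf1 b0 (by rw [hbs]; simp)
            have hfb1 : f ≤ b1 := hf1 b1 (by rw [hbs, hbs1]; simp)
            have := hf3 L hL
            omega
          refine ih (base.length + (made ++ [b0 + 2 * b1]).length - (i + 2 + j)) ?_ base _
            (i + 2) j _ K (cnt + 1) ?_ ?_ rfl ?_ ?_ ?_ ?_ ?_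
          · simp only [List.length_append, List.length_cons, List.length_nil]; omega
          · omega
          · simp only [List.length_append, List.length_cons, List.length_nil]; omega
          · rw [hdrop2]
            exact (List.pairwise_cons.mp (hbs1 ▸ hsb1)).2
          · rw [happ]; exact pairwise_concat_of_le _ _ hsm hmsle
          · rw [happ, hdrop2, ← List.append_assoc]
            refine List.Perm.append_right _ ?_
            refine erase_perm_middle (h.erase b0) [] (bs2 ++ made.drop j) b1 ?_
            rw [hbs1] at hera; simpa using hera
          · intro _
            refine ⟨b1, ?_, ?_, ?_⟩
            · rw [hdrop2]; exact hb1bs2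
            · rw [happ, List.dropLast_concat]; exact hb1ms
            · rw [happ, List.getLast?_concat]
              intro L hL; injection hL with hL; omega
          · rw [happ]; simp
        · -- ===== second pop from made =====
          have hjne : j ≠ made.length := fun e => hC2 (Or.inl e)
          have hmsne : made.drop j ≠ [] := fun e => hjne (hmsnil.mpr e)
          obtain ⟨m0, ms1, hms⟩ := List.exists_cons_of_ne_nil hmsne
          have hm0 : made.getD j 0 = m0 := drop_cons_getD made j m0 ms1 hms
          have hjlt : j < made.length := by omega
          have hdropj1 : made.drop (j + 1) = ms1 := drop_cons_succ made j m0 ms1 hms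
          have hsm1 : ms1.Pairwise (· ≤ ·) := by
            rw [hms] at hsm; exact (List.pairwise_cons.mp hsm).2
          have hm0ms1 : ∀ y ∈ ms1, m0 ≤ y := by
            rw [hms] at hsm; exact (List.pairwise_cons.mp hsm).1
          have hbs1m : ∀ y ∈ bs1, m0 ≤ y := by
            intro y hy
            have hne1 : bs1 ≠ [] := List.ne_nil_of_mem hy
            obtain ⟨b1, bs2, hbs1⟩ := List.exists_cons_of_ne_nil hne1
            have hbs1' : base.drop (i + 1) = b1 :: bs2 := by rw [hdrop1, hbs1]
            have hlt1 : i + 1 < base.length := drop_cons_lt base (i+1) b1 bs2 hbs1'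
            have hgetD1 : base.getD (i + 1) 0 = b1 := drop_cons_getD base (i+1) b1 bs2 hbs1'
            have hm0b1 : ¬ (base.getD (i + 1) 0 ≤ made.getD j 0) :=
              fun hle => hC2 (Or.inr ⟨hlt1, hle⟩)
            rw [hgetD1, hm0] at hm0b1
            rw [hbs1] at hy
            rcases List.mem_cons.mp hy with rfl | hy'
            · omega
            · have := (List.pairwise_cons.mp (hbs1 ▸ hsb1)).1 y hy'
              omega
          have hmin2 : (h.erase b0).min? = some m0 := by
            refine min?_split _ bs1 (made.drop j) m0 hera
              (List.mem_append.mpr (Or.inr (by rw [hms]; exact List.mem_cons_self))) hbs1m ?_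
            intro y hy
            rw [hms] at hy
            rcases List.mem_cons.mp hy with rfl | hy'
            · exact le_refl _
            · exact hm0ms1 y hy'
          rw [if_neg hC2, hm0]
          rw [loopA_step K cnt h b0 m0 hmin hKlt hmin2,
              show b0 + m0 * 2 = b0 + 2 * m0 from by ring]
          have hb0m0 : b0 ≤ m0 := hb0ms m0 (by rw [hms]; simp)
          have happ : (made ++ [b0 + 2 * m0]).drop (j + 1) = ms1 ++ [b0 + 2 * m0] := by
            rw [drop_append_one made _ (j+1) (by omega), hdropj1]
          have hmsle : ∀ y ∈ ms1, y ≤ b0 + 2 * m0 := by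
            intro y hy
            have hms1ne : ms1 ≠ [] := List.ne_nil_of_mem hy
            obtain ⟨f, hf1, hf2, hf3⟩ := hinv hmsne
            obtain ⟨L, hL⟩ := Option.isSome_iff_exists.mp (List.getLast?_isSome.mpr hmsne)
            have hyL := sorted_all_le_getLast (made.drop j) hsm L hL y (by rw [hms]; exact List.mem_cons_of_mem _ hy)
            have hfb0 : f ≤ b0 := hf1 b0 (by rw [hbs]; simp)
            have hfm0 : f ≤ m0 := hf2 m0 (by
              rw [hms]
              exact mem_dropLast_of_append [m0] ms1 hms1ne m0 (by simp))
            have := hf3 L hL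
            omega
          refine ih (base.length + (made ++ [b0 + 2 * m0]).length - (i + 1 + (j + 1))) ?_ base _
            (i + 1) (j + 1) _ K (cnt + 1) ?_ ?_ rfl ?_ ?_ ?_ ?_ ?_
          · simp only [List.length_append, List.length_cons, List.length_nil]; omega
          · omega
          · simp only [List.length_append, List.length_cons, List.length_nil]; omega
          · rw [hdrop1]; exact hsb1
          · rw [happ]; exact pairwise_concat_of_le _ _ hsm1 hmsle
          · rw [happ, hdrop1, ← List.append_assoc]
            refine List.Perm.append_right _ ?_
            refine erase_perm_middle (h.erase b0) bs1 ms1 m0 ?_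
            rw [hms] at hera; exact hera
          · intro _
            refine ⟨m0, ?_, ?_, ?_⟩
            · rw [hdrop1]; exact hbs1m
            · rw [happ, List.dropLast_concat]; exact hm0ms1
            · rw [happ, List.getLast?_concat]
              intro L hL; injection hL with hL; omega
          · rw [happ]; simp
  · -- ===== peek takes made[j] =====
    have hjne : j ≠ made.length := fun e => hC (Or.inl e)
    have hnb : ¬ (i < base.length ∧ base.getD i 0 ≤ made.getD j 0) := fun hx => hC (Or.inr hx)
    have hmsne : made.drop j ≠ [] := fun e => hjne (hmsnil.mpr e)
    obtain ⟨m0, ms1, hms⟩ := List.exists_cons_of_ne_nil hmsne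
    have hm0 : made.getD j 0 = m0 := drop_cons_getD made j m0 ms1 hms
    have hjm : made[j]? = some m0 := drop_cons_getElem? made j m0 ms1 hms
    have hjlt : j < made.length := by omega
    have hdropj1 : made.drop (j + 1) = ms1 := drop_cons_succ made j m0 ms1 hms
    have hsm1 : ms1.Pairwise (· ≤ ·) := by
      rw [hms] at hsm; exact (List.pairwise_cons.mp hsm).2
    have hm0ms1 : ∀ y ∈ ms1, m0 ≤ y := by
      rw [hms] at hsm; exact (List.pairwise_cons.mp hsm).1
    have hm0bs : ∀ y ∈ base.drop i, m0 ≤ y := by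
      intro y hy
      have hne1 : base.drop i ≠ [] := List.ne_nil_of_mem hy
      obtain ⟨b0, bs1, hbs⟩ := List.exists_cons_of_ne_nil hne1
      have hilt : i < base.length := drop_cons_lt base i b0 bs1 hbs
      have higetD : base.getD i 0 = b0 := drop_cons_getD base i b0 bs1 hbs
      have hm0b0 : ¬ (base.getD i 0 ≤ made.getD j 0) := fun hle => hnb ⟨hilt, hle⟩
      rw [higetD, hm0] at hm0b0
      rw [hbs] at hy
      rcases List.mem_cons.mp hy with rfl | hy'
      · omega
      · have := (List.pairwise_cons.mp (hbs ▸ hsb)).1 y hy'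
        omega
    have hmin : h.min? = some m0 := by
      refine min?_split h (base.drop i) (made.drop j) m0 hperm
        (List.mem_append.mpr (Or.inr (by rw [hms]; exact List.mem_cons_self))) hm0bs ?_
      intro y hy
      rw [hms] at hy
      rcases List.mem_cons.mp hy with rfl | hy'
      · exact le_refl _
      · exact hm0ms1 y hy'
    rw [if_neg hC, hjm]
    simp only []
    by_cases hK : K ≤ m0
    · rw [if_pos hK]
      exact loopA_stop K cnt h m0 hmin (by omega)
    · rw [if_neg hK]
      have hKlt : m0 < K := by omega
      by_cases hrem : ((base.length : Int) - i) + ((made.length : Int) - j) < 2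
      · rw [if_pos hrem]
        have h1 : (base.drop i).length + (made.drop j).length ≤ 1 := by
          rw [hlenbs, hlenms]; omega
        rw [hms] at h1; simp only [List.length_cons] at h1
        have hb1 : base.drop i = [] := List.length_eq_zero_iff.mp (by omega)
        have hm1 : ms1 = [] := List.length_eq_zero_iff.mp (by omega)
        have hh : h = [m0] := by
          apply List.Perm.eq_singleton
          rw [hb1, hms, hm1] at hperm
          simpa using hperm
        refine loopA_fail K cnt h m0 hmin hKlt ?_
        rw [hh, List.erase_cons_head]; rfl
      · rw [if_neg hrem]
        have hrem2 : 2 ≤ (base.drop i).length + (made.drop j).length := by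
          rw [hlenbs, hlenms]; omega
        have hera : (h.erase m0).Perm (base.drop i ++ ms1) := by
          refine erase_perm_middle h (base.drop i) ms1 m0 ?_
          rw [hms] at hperm; exact hperm
        rw [if_neg hC]
        have hmsnil1 : j + 1 = made.length ↔ ms1 = [] := by
          rw [← hdropj1, List.drop_eq_nil_iff]; omega
        by_cases hC3 : j + 1 = made.length ∨ (i < base.length ∧ base.getD i 0 ≤ made.getD (j + 1) 0)
        · -- ===== second pop from base =====
          have hbsne : base.drop i ≠ [] := by
            rcases hC3 with hC1 | hC3'
            · have hm1 : ms1 = [] := hmsnil1.mp hC1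
              rw [hms, hm1] at hrem2
              simp only [List.length_cons, List.length_nil] at hrem2
              intro e; rw [e] at hrem2; simp at hrem2
            · intro e; have := List.drop_eq_nil_iff.mp e; omega
          obtain ⟨b0, bs1, hbs⟩ := List.exists_cons_of_ne_nil hbsne
          have hib : base[i]? = some b0 := drop_cons_getElem? base i b0 bs1 hbs
          have higetD : base.getD i 0 = b0 := drop_cons_getD base i b0 bs1 hbs
          have hilt : i < base.length := drop_cons_lt base i b0 bs1 hbs
          have hdrop1 : base.drop (i + 1) = bs1 := drop_cons_succ base i b0 bs1 hbs
          have hsb1 : bs1.Pairwise (· ≤ ·) := by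
            rw [hbs] at hsb; exact (List.pairwise_cons.mp hsb).2
          have hb0bs : ∀ y ∈ base.drop i, b0 ≤ y := by
            intro y hy; rw [hbs] at hy
            rcases List.mem_cons.mp hy with rfl | hy'
            · exact le_refl _
            · exact (List.pairwise_cons.mp (hbs ▸ hsb)).1 y hy'
          have hb0ms1 : ∀ y ∈ ms1, b0 ≤ y := by
            rcases hC3 with hC1 | hC3'
            · rw [hmsnil1.mp hC1]; intro y hy; cases hy
            · intro y hy
              have hms1ne : ms1 ≠ [] := List.ne_nil_of_mem hy
              obtain ⟨m1, ms2, hms1⟩ := List.exists_cons_of_ne_nil hms1ne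
              have hms1' : made.drop (j + 1) = m1 :: ms2 := by rw [hdropj1, hms1]
              have hm1 : made.getD (j + 1) 0 = m1 := drop_cons_getD made (j+1) m1 ms2 hms1'
              rw [higetD, hm1] at hC3'
              rw [hms1] at hy
              rcases List.mem_cons.mp hy with rfl | hy'
              · exact hC3'.2
              · exact le_trans hC3'.2 ((List.pairwise_cons.mp (hms1 ▸ hsm1)).1 y hy')
          have hmin2 : (h.erase m0).min? = some b0 := by
            refine min?_split _ (base.drop i) ms1 b0 hera
              (List.mem_append.mpr (Or.inl (by rw [hbs]; exact List.mem_cons_self))) hb0bs hb0ms1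
          rw [if_pos hC3, higetD]
          rw [loopA_step K cnt h m0 b0 hmin hKlt hmin2,
              show m0 + b0 * 2 = m0 + 2 * b0 from by ring]
          have hm0b0 : m0 ≤ b0 := hm0bs b0 (by rw [hbs]; simp)
          have happ : (made ++ [m0 + 2 * b0]).drop (j + 1) = ms1 ++ [m0 + 2 * b0] := by
            rw [drop_append_one made _ (j+1) (by omega), hdropj1]
          have hmsle : ∀ y ∈ ms1, y ≤ m0 + 2 * b0 := by
            intro y hy
            have hms1ne : ms1 ≠ [] := List.ne_nil_of_mem hy
            obtain ⟨f, hf1, hf2, hf3⟩ := hinv hmsne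
            obtain ⟨L, hL⟩ := Option.isSome_iff_exists.mp (List.getLast?_isSome.mpr hmsne)
            have hyL := sorted_all_le_getLast (made.drop j) hsm L hL y (by rw [hms]; exact List.mem_cons_of_mem _ hy)
            have hfb0 : f ≤ b0 := hf1 b0 (by rw [hbs]; simp)
            have hfm0 : f ≤ m0 := hf2 m0 (by
              rw [hms]
              exact mem_dropLast_of_append [m0] ms1 hms1ne m0 (by simp))
            have := hf3 L hL
            omega
          refine ih (base.length + (made ++ [m0 + 2 * b0]).length - (i + 1 + (j + 1))) ?_ base _
            (i + 1) (j + 1) _ K (cnt + 1) ?_ ?_ rfl ?_ ?_ ?_ ?_ ?_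
          · simp only [List.length_append, List.length_cons, List.length_nil]; omega
          · omega
          · simp only [List.length_append, List.length_cons, List.length_nil]; omega
          · rw [hdrop1]; exact hsb1
          · rw [happ]; exact pairwise_concat_of_le _ _ hsm1 hmsle
          · rw [happ, hdrop1, ← List.append_assoc]
            refine List.Perm.append_right _ ?_
            refine erase_perm_middle (h.erase m0) [] (bs1 ++ ms1) b0 ?_
            rw [hbs] at hera; simpa using hera
          · intro _
            refine ⟨b0, ?_, ?_, ?_⟩
            · rw [hdrop1]
              intro x hx
              exact (List.pairwise_cons.mp (hbs ▸ hsb)).1 x hx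
            · rw [happ, List.dropLast_concat]; exact hb0ms1
            · rw [happ, List.getLast?_concat]
              intro L hL; injection hL with hL; omega
          · rw [happ]; simp
        · -- ===== both pops from made =====
          have hj1ne : j + 1 ≠ made.length := fun e => hC3 (Or.inl e)
          have hms1ne : ms1 ≠ [] := fun e => hj1ne (hmsnil1.mpr e)
          obtain ⟨m1, ms2, hms1⟩ := List.exists_cons_of_ne_nil hms1ne
          have hms1' : made.drop (j + 1) = m1 :: ms2 := by rw [hdropj1, hms1]
          have hm1 : made.getD (j + 1) 0 = m1 := drop_cons_getD made (j+1) m1 ms2 hms1'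
          have hj1lt : j + 1 < made.length := by omega
          have hdropj2 : made.drop (j + 2) = ms2 := by
            have := drop_cons_succ made (j+1) m1 ms2 hms1'
            simpa [Nat.add_assoc] using this
          have hsm2 : ms2.Pairwise (· ≤ ·) := by
            rw [hms1] at hsm1; exact (List.pairwise_cons.mp hsm1).2
          have hm1ms2 : ∀ y ∈ ms2, m1 ≤ y := by
            rw [hms1] at hsm1; exact (List.pairwise_cons.mp hsm1).1
          have hm1bs : ∀ y ∈ base.drop i, m1 ≤ y := by
            intro y hy
            have hne1 : base.drop i ≠ [] := List.ne_nil_of_mem hy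
            obtain ⟨b0, bs1, hbs⟩ := List.exists_cons_of_ne_nil hne1
            have hilt : i < base.length := drop_cons_lt base i b0 bs1 hbs
            have higetD : base.getD i 0 = b0 := drop_cons_getD base i b0 bs1 hbs
            have hm1b0 : ¬ (base.getD i 0 ≤ made.getD (j + 1) 0) :=
              fun hle => hC3 (Or.inr ⟨hilt, hle⟩)
            rw [higetD, hm1] at hm1b0
            rw [hbs] at hy
            rcases List.mem_cons.mp hy with rfl | hy'
            · omega
            · have := (List.pairwise_cons.mp (hbs ▸ hsb)).1 y hy'
              omega
          have hmin2 : (h.erase m0).min? = some m1 := by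
            refine min?_split _ (base.drop i) ms1 m1 hera
              (List.mem_append.mpr (Or.inr (by rw [hms1]; exact List.mem_cons_self))) hm1bs ?_
            intro y hy
            rw [hms1] at hy
            rcases List.mem_cons.mp hy with rfl | hy'
            · exact le_refl _
            · exact hm1ms2 y hy'
          rw [if_neg hC3, hm1]
          rw [loopA_step K cnt h m0 m1 hmin hKlt hmin2,
              show m0 + m1 * 2 = m0 + 2 * m1 from by ring]
          have hm0m1 : m0 ≤ m1 := hm0ms1 m1 (by rw [hms1]; simp)
          have happ : (made ++ [m0 + 2 * m1]).drop (j + 2) = ms2 ++ [m0 + 2 * m1] := by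
            rw [drop_append_one made _ (j+2) (by omega), hdropj2]
          have hmsle : ∀ y ∈ ms2, y ≤ m0 + 2 * m1 := by
            intro y hy
            have hms2ne : ms2 ≠ [] := List.ne_nil_of_mem hy
            obtain ⟨f, hf1, hf2, hf3⟩ := hinv hmsne
            obtain ⟨L, hL⟩ := Option.isSome_iff_exists.mp (List.getLast?_isSome.mpr hmsne)
            have hyL := sorted_all_le_getLast (made.drop j) hsm L hL y
              (by rw [hms, hms1]; exact List.mem_cons_of_mem _ (List.mem_cons_of_mem _ hy))
            have hfm0 : f ≤ m0 := hf2 m0 (by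
              rw [hms, hms1]
              exact mem_dropLast_of_append [m0, m1] ms2 hms2ne m0 (by simp))
            have hfm1 : f ≤ m1 := hf2 m1 (by
              rw [hms, hms1]
              exact mem_dropLast_of_append [m0, m1] ms2 hms2ne m1 (by simp))
            have := hf3 L hL
            omega
          refine ih (base.length + (made ++ [m0 + 2 * m1]).length - (i + (j + 2))) ?_ base _
            i (j + 2) _ K (cnt + 1) ?_ ?_ rfl ?_ ?_ ?_ ?_ ?_
          · simp only [List.length_append, List.length_cons, List.length_nil]; omega
          · omega
          · simp only [List.length_append, List.length_cons, List.length_nil]; omega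
          · exact hsb
          · rw [happ]; exact pairwise_concat_of_le _ _ hsm2 hmsle
          · rw [happ, ← List.append_assoc]
            refine List.Perm.append_right _ ?_
            refine erase_perm_middle (h.erase m0) (base.drop i) ms2 m1 ?_
            rw [hms1] at hera; exact hera
          · intro _
            refine ⟨m1, ?_, ?_, ?_⟩
            · exact hm1bs
            · rw [happ, List.dropLast_concat]; exact hm1ms2
            · rw [happ, List.getLast?_concat]
              intro L hL; injection hL with hL; omega
          · rw [happ]; simp

-- ===== VERDICT (by name: the statement is the Claim_ definition above) =====
theorem solution_spec : Claim_equal_solution := by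
  intro scoville K _ hpre
  unfold Spec_solution solution solution_alt
  refine loop_agree ((PySem.List.sorted scoville (fun x => x) false).length + ([] : List Int).length - (0 + 0))
    (PySem.List.sorted scoville (fun x => x) false) [] 0 0 scoville K 0
    (Nat.zero_le _) (Nat.zero_le _) rfl ?_ (by simp) ?_ (by intro hx; simp at hx) ?_
  · simpa using PySem.List.sorted_pairwise scoville (fun x => x)
  · simpa using (PySem.List.sorted_perm scoville (fun x => x) false).symm
  · simp only [List.drop_nil, List.append_nil, List.drop_zero]
    intro e
    exact hpre (((PySem.List.sorted_eq_nil_iff scoville (fun x => x) false)).mp e)
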